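-- pv_equiv track=rewrite | github.com/zonkia/XTB-autoTrader | tradingDefs.py | change_trades_order
-- ===== SOURCE A (Python) =====
-- def reverse_dict(dictionary):
--     reversed_keys = reversed(list(dictionary.keys()))
--     return {key: dictionary[key]
--             for key in reversed_keys
--             }
--
-- def change_trades_order(semiTrades, fullTrades, withoutCurrent):
--
--     finalOrderTrades = {}
--     orderAfterSemi = {}
--     orderAfterFull = {}
--
--     if len(list(semiTrades.keys())) > 0:
--         for pair in reverse_dict(semiTrades):
--             if pair in withoutCurrent:
--                 orderAfterSemi[pair] = withoutCurrent[pair]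
--
--     if len(list(fullTrades.keys())) > 0:
--         for pair in reverse_dict(fullTrades):
--             if pair in withoutCurrent:
--                 orderAfterFull[pair] = withoutCurrent[pair]
--
--     finalOrderTrades = {**orderAfterFull, **orderAfterSemi}
--
--     for pair in withoutCurrent:
--         if pair not in finalOrderTrades:
--             finalOrderTrades[pair] = withoutCurrent[pair]
--
--     return finalOrderTrades
-- ===== SOURCE B (Python) =====
-- def change_trades_order(semiTrades, fullTrades, withoutCurrent):
--     # Assign every key of withoutCurrent a numeric priority, then sort by it:
--     # full keys get the lowest band (reversed order), semi keys the middle band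
--     # (reversed order), everything else keeps its withoutCurrent position.
--     n = max(len(semiTrades), len(fullTrades), len(withoutCurrent)) + 1
--     rank = {}
--     for i, key in enumerate(withoutCurrent):
--         rank[key] = 2 * n + i
--     for i, key in enumerate(semiTrades):
--         if key in rank:
--             rank[key] = 2 * n - 1 - i
--     for i, key in enumerate(fullTrades):
--         if key in rank:
--             rank[key] = n - 1 - i
--     return dict(sorted(withoutCurrent.items(), key=lambda kv: rank[kv[0]]))
-- ===== Notes on version B (the rewrite author's own statement) =====
-- stated objective: alternative
-- what changed: Replaces A's three-dict build-and-merge (two filtered reversed-dict loops, a {**full,**semi} merge, then a fill-in loop over withoutCurrent) with a rank-and-sort algorithm: each withoutCurrent key gets a numeric priority (full band reversed, then semi band reversed, then its own position) and the items are sorted once by that priority.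
import Mathlib
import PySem

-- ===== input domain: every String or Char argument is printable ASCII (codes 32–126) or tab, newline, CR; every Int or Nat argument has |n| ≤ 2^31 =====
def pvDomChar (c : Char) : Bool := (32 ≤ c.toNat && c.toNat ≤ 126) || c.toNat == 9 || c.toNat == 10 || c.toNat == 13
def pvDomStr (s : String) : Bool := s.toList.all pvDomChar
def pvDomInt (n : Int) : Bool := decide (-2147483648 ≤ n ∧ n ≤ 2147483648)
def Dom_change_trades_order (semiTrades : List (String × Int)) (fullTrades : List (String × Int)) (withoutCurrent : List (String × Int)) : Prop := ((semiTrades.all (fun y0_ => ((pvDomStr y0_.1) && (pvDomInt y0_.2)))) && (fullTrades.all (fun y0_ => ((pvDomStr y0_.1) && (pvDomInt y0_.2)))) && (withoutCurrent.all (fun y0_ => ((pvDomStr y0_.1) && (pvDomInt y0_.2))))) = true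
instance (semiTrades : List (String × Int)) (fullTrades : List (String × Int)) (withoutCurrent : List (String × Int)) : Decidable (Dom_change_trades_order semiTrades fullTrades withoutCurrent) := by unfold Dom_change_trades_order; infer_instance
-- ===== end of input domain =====

-- B replaces A's three-dict build-and-merge with a sort of withoutCurrent's items
-- under a numeric priority computed per key (objective: alternative algorithm).

-- ===== PORT A =====
-- reverse_dict: new dict with the keys in reversed order (dictionary[key] is exact
-- on its own keys, so Dict.getD with default 0 reads the same value).
def pvReverseDict (d : PySem.Dict String Int) : PySem.Dict String Int :=
  (d.keys.reverse).foldl (fun r k => r.insert k (d.getD k 0)) PySem.Dict.empty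

def change_trades_order (semiTrades : List (String × Int)) (fullTrades : List (String × Int)) (withoutCurrent : List (String × Int)) : List (String × Int) :=
  let semiD := PySem.Dict.ofList semiTrades
  let fullD := PySem.Dict.ofList fullTrades
  let wcD := PySem.Dict.ofList withoutCurrent
  let orderAfterSemi : PySem.Dict String Int :=
    if semiD.keys.length > 0 then
      (pvReverseDict semiD).keys.foldl
        (fun acc pair => if wcD.contains pair then acc.insert pair (wcD.getD pair 0) else acc)
        PySem.Dict.empty
    else PySem.Dict.empty
  let orderAfterFull : PySem.Dict String Int :=
    if fullD.keys.length > 0 then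
      (pvReverseDict fullD).keys.foldl
        (fun acc pair => if wcD.contains pair then acc.insert pair (wcD.getD pair 0) else acc)
        PySem.Dict.empty
    else PySem.Dict.empty
  -- finalOrderTrades = {**orderAfterFull, **orderAfterSemi}
  let final0 : PySem.Dict String Int :=
    orderAfterSemi.items.foldl (fun d p => d.insert p.1 p.2) orderAfterFull
  -- for pair in withoutCurrent: if pair not in finalOrderTrades: finalOrderTrades[pair] = withoutCurrent[pair]
  let final : PySem.Dict String Int :=
    wcD.keys.foldl (fun d pair => if d.contains pair then d else d.insert pair (wcD.getD pair 0)) final0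
  final.items

-- ===== PORT B =====
-- 'for i, key in enumerate(withoutCurrent): rank[key] = 2*n + i'  (i carried explicitly)
def pvRankInit (n : Int) (r : PySem.Dict String Int) (i : Int) : List String → PySem.Dict String Int
  | [] => r
  | k :: ks => pvRankInit n (r.insert k (2 * n + i)) (i + 1) ks

-- 'for i, key in enumerate(d): if key in rank: rank[key] = f(i)'  (f is the loop's formula)
def pvRankOver (f : Int → Int) (r : PySem.Dict String Int) (i : Int) : List String → PySem.Dict String Int
  | [] => r
  | k :: ks => pvRankOver f (if r.contains k then r.insert k (f i) else r) (i + 1) ks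

def change_trades_order_alt (semiTrades : List (String × Int)) (fullTrades : List (String × Int)) (withoutCurrent : List (String × Int)) : List (String × Int) :=
  let semiD := PySem.Dict.ofList semiTrades
  let fullD := PySem.Dict.ofList fullTrades
  let wcD := PySem.Dict.ofList withoutCurrent
  let n : Int := (max (max semiD.size fullD.size) wcD.size : Nat) + 1
  let rank : PySem.Dict String Int :=
    pvRankOver (fun i => n - 1 - i)
      (pvRankOver (fun i => 2 * n - 1 - i)
        (pvRankInit n PySem.Dict.empty 0 wcD.keys) 0 semiD.keys)
      0 fullD.keys
  -- rank[kv[0]]: exact lookup; every key of wcD.items is in rank, so getD's default is never read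
  (PySem.Dict.ofList (PySem.List.sorted wcD.items (fun kv => rank.getD kv.1 0))).items

-- ===== PRECONDITION & SPEC =====
def Spec_change_trades_order (semiTrades : List (String × Int)) (fullTrades : List (String × Int)) (withoutCurrent : List (String × Int)) (out : List (String × Int)) : Prop := out = change_trades_order_alt semiTrades fullTrades withoutCurrent
instance (semiTrades : List (String × Int)) (fullTrades : List (String × Int)) (withoutCurrent : List (String × Int)) (out : List (String × Int)) : Decidable (Spec_change_trades_order semiTrades fullTrades withoutCurrent out) := by unfold Spec_change_trades_order; infer_instance

-- ===== CLAIM (what is proved, stated in full; the proofs are below) =====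
def Claim_equal_change_trades_order : Prop := ∀ (semiTrades : List (String × Int)) (fullTrades : List (String × Int)) (withoutCurrent : List (String × Int)), Dom_change_trades_order semiTrades fullTrades withoutCurrent → Spec_change_trades_order semiTrades fullTrades withoutCurrent (change_trades_order semiTrades fullTrades withoutCurrent)

-- ===== LEMMAS AND PROOFS =====

-- The key order A produces: reversed full keys kept by withoutCurrent, then reversed
-- semi keys not already taken, then the remaining withoutCurrent keys.
def pvCollect (w : PySem.Dict String Int) (seen : List String) : List String → List String
  | [] => []
  | k :: ks =>
      if w.contains k ∧ k ∉ seen then k :: pvCollect w (seen ++ [k]) ks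
      else pvCollect w seen ks

def pvEntry (w : PySem.Dict String Int) (k : String) : String × Int := (k, w.getD k 0)

lemma pv_contains_mk_map (w : PySem.Dict String Int) (ord : List String) (k : String) :
    (PySem.Dict.mk (ord.map (pvEntry w))).contains k = decide (k ∈ ord) := by
  rw [PySem.Dict.contains_eq_decide_mem_keys, PySem.Dict.keys_mk]
  simp [pvEntry]

lemma pv_insert_mem (w : PySem.Dict String Int) (ord : List String) (k : String) (hk : k ∈ ord) :
    (PySem.Dict.mk (ord.map (pvEntry w))).insert k (w.getD k 0) = PySem.Dict.mk (ord.map (pvEntry w)) := by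
  have hc : (PySem.Dict.mk (ord.map (pvEntry w))).contains k = true := by
    rw [pv_contains_mk_map]; simpa using hk
  simp only [PySem.Dict.insert, hc, if_pos]
  congr 1
  rw [List.map_map]
  apply List.map_congr_left
  intro a _
  by_cases h : a = k <;> simp [pvEntry, h]

lemma pv_insert_not_mem (w : PySem.Dict String Int) (ord : List String) (k : String) (hk : k ∉ ord) :
    (PySem.Dict.mk (ord.map (pvEntry w))).insert k (w.getD k 0) = PySem.Dict.mk ((ord ++ [k]).map (pvEntry w)) := by
  have hc : (PySem.Dict.mk (ord.map (pvEntry w))).contains k = false := by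
    rw [pv_contains_mk_map]; simpa using hk
  simp [PySem.Dict.insert, hc, pvEntry]

lemma pv_nodup_append_singleton {ord : List String} {k : String} (h : ord.Nodup) (hm : k ∉ ord) :
    (ord ++ [k]).Nodup := by
  rw [List.nodup_append]
  refine ⟨h, List.nodup_singleton k, ?_⟩
  intro a ha b hb
  simp only [List.mem_singleton] at hb
  subst hb
  exact fun e => hm (e ▸ ha)

lemma pv_masterA (w : PySem.Dict String Int) :
    ∀ (ks ord : List String), ord.Nodup →
      ks.foldl (fun acc k => if w.contains k then acc.insert k (w.getD k 0) else acc)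
        (PySem.Dict.mk (ord.map (pvEntry w)))
      = PySem.Dict.mk ((ord ++ pvCollect w ord ks).map (pvEntry w)) := by
  intro ks
  induction ks with
  | nil => intro ord h; simp [pvCollect]
  | cons k ks ih =>
    intro ord h
    rw [List.foldl_cons, pvCollect]
    by_cases hw : w.contains k = true
    · rw [if_pos hw]
      by_cases hm : k ∈ ord
      · rw [pv_insert_mem w ord k hm, if_neg (by tauto), ih ord h]
      · rw [pv_insert_not_mem w ord k hm, if_pos ⟨hw, hm⟩,
           ih (ord ++ [k]) (pv_nodup_append_singleton h hm)]
        simp [List.append_assoc]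
    · rw [if_neg hw, if_neg (by tauto), ih ord h]

lemma pv_masterN (w : PySem.Dict String Int) :
    ∀ (ks ord : List String), ord.Nodup → (∀ k ∈ ks, w.contains k = true) →
      ks.foldl (fun d k => if d.contains k then d else d.insert k (w.getD k 0))
        (PySem.Dict.mk (ord.map (pvEntry w)))
      = PySem.Dict.mk ((ord ++ pvCollect w ord ks).map (pvEntry w)) := by
  intro ks
  induction ks with
  | nil => intro ord h _; simp [pvCollect]
  | cons k ks ih =>
    intro ord h hall
    have hw : w.contains k = true := hall k (List.mem_cons_self ..)
    rw [List.foldl_cons, pvCollect]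
    by_cases hm : k ∈ ord
    · rw [if_pos (by rw [pv_contains_mk_map]; simpa using hm), if_neg (by tauto),
         ih ord h (fun a ha => hall a (List.mem_cons_of_mem _ ha))]
    · rw [if_neg (by rw [pv_contains_mk_map]; simpa using hm),
         pv_insert_not_mem w ord k hm, if_pos ⟨hw, hm⟩,
         ih (ord ++ [k]) (pv_nodup_append_singleton h hm) (fun a ha => hall a (List.mem_cons_of_mem _ ha))]
      simp [List.append_assoc]

lemma pv_reverseDict_keys (l : List (String × Int)) :
    (pvReverseDict (PySem.Dict.ofList l)).keys = (PySem.Dict.ofList l).keys.reverse := by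
  unfold pvReverseDict
  rw [PySem.Dict.keys_foldl_insert ((PySem.Dict.ofList l).keys.reverse) (fun _ k => (PySem.Dict.ofList l).getD k 0)]
  have hnd : ((PySem.Dict.ofList l).keys.reverse).Nodup :=
    List.nodup_reverse.mpr (PySem.Dict.nodup_keys_ofList l)
  have : (PySem.Dict.empty : PySem.Dict String Int).keys = [] := by
    simp [PySem.Dict.keys_empty]
  rw [this]
  have := PySem.Set.ofList_eq_self_of_nodup _ hnd
  calc PySem.Set.update [] ((PySem.Dict.ofList l).keys.reverse)
      = PySem.Set.ofList ((PySem.Dict.ofList l).keys.reverse) := by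
        rw [PySem.Set.ofList_eq_foldl]; rfl
    _ = (PySem.Dict.ofList l).keys.reverse := this

lemma pv_collect_nodup (w : PySem.Dict String Int) :
    ∀ (ks ord : List String), ord.Nodup → (ord ++ pvCollect w ord ks).Nodup := by
  intro ks
  induction ks with
  | nil => intro ord h; simpa [pvCollect]
  | cons k ks ih =>
    intro ord h
    rw [pvCollect]
    by_cases hcond : w.contains k = true ∧ k ∉ ord
    · rw [if_pos hcond]
      have := ih (ord ++ [k]) (pv_nodup_append_singleton h hcond.2)
      simpa [List.append_assoc] using this
    · rw [if_neg hcond]; exact ih ord h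

lemma pv_collect_mem (w : PySem.Dict String Int) :
    ∀ (ks seen k : _), k ∈ pvCollect w seen ks → w.contains k = true := by
  intro ks
  induction ks with
  | nil => intro seen k hk; simp [pvCollect] at hk
  | cons a ks ih =>
    intro seen k hk
    rw [pvCollect] at hk
    by_cases hcond : w.contains a = true ∧ a ∉ seen
    · rw [if_pos hcond] at hk
      rcases List.mem_cons.mp hk with rfl | hk
      · exact hcond.1
      · exact ih _ _ hk
    · rw [if_neg hcond] at hk; exact ih _ _ hk

lemma pv_collect_sublist (w : PySem.Dict String Int) :
    ∀ (ks seen : List String), (pvCollect w seen ks).Sublist ks := by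
  intro ks
  induction ks with
  | nil => intro seen; simp [pvCollect]
  | cons a ks ih =>
    intro seen
    rw [pvCollect]
    by_cases hcond : w.contains a = true ∧ a ∉ seen
    · rw [if_pos hcond]; exact List.Sublist.cons₂ a (ih _)
    · rw [if_neg hcond]; exact List.Sublist.cons a (ih _)

lemma pv_collect_not_seen (w : PySem.Dict String Int) :
    ∀ (ks seen k : _), k ∈ pvCollect w seen ks → k ∉ seen := by
  intro ks
  induction ks with
  | nil => intro seen k hk; simp [pvCollect] at hk
  | cons a ks ih =>
    intro seen k hk
    rw [pvCollect] at hk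
    by_cases hcond : w.contains a = true ∧ a ∉ seen
    · rw [if_pos hcond] at hk
      rcases List.mem_cons.mp hk with rfl | hk
      · exact hcond.2
      · intro hs
        exact ih _ _ hk (by simp [hs])
    · rw [if_neg hcond] at hk; exact ih _ _ hk

lemma pv_collect_complete (w : PySem.Dict String Int) :
    ∀ (ks seen k : _), k ∈ ks → w.contains k = true → k ∈ seen ∨ k ∈ pvCollect w seen ks := by
  intro ks
  induction ks with
  | nil => intro seen k hk _; simp at hk
  | cons a ks ih =>
    intro seen k hk hw
    rw [pvCollect]
    by_cases hcond : w.contains a = true ∧ a ∉ seen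
    · rw [if_pos hcond]
      rcases List.mem_cons.mp hk with rfl | hk
      · right; exact List.mem_cons_self ..
      · rcases ih (seen ++ [a]) k hk hw with hs | hc
        · rcases List.mem_append.mp hs with hs | hs
          · left; exact hs
          · right; simp only [List.mem_singleton] at hs; subst hs; exact List.mem_cons_self ..
        · right; exact List.mem_cons_of_mem _ hc
    · rw [if_neg hcond]
      rcases List.mem_cons.mp hk with rfl | hk
      · rcases (Decidable.not_and_iff_or_not ..).mp hcond with h1 | h2
        · exact absurd hw h1
        · left; exact not_not.mp h2
      · exact ih seen k hk hw

-- stage 1 of A in closed form (both branches of the emptiness guard)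
lemma pv_stage1 (l wc : List (String × Int)) :
    (if (PySem.Dict.ofList l).keys.length > 0 then
      (pvReverseDict (PySem.Dict.ofList l)).keys.foldl
        (fun acc pair => if (PySem.Dict.ofList wc).contains pair then acc.insert pair ((PySem.Dict.ofList wc).getD pair 0) else acc)
        PySem.Dict.empty
    else PySem.Dict.empty)
    = PySem.Dict.mk ((pvCollect (PySem.Dict.ofList wc) [] ((PySem.Dict.ofList l).keys.reverse)).map (pvEntry (PySem.Dict.ofList wc))) := by
  by_cases hlen : (PySem.Dict.ofList l).keys.length > 0
  · rw [if_pos hlen, pv_reverseDict_keys]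
    have := pv_masterA (PySem.Dict.ofList wc) ((PySem.Dict.ofList l).keys.reverse) [] List.nodup_nil
    simpa using this
  · rw [if_neg hlen]
    have hnil : (PySem.Dict.ofList l).keys = [] := by
      simpa [List.length_eq_zero_iff] using hlen
    rw [hnil]
    rfl

lemma pv_collect_filter (w : PySem.Dict String Int) :
    ∀ (ks seen : List String),
      pvCollect w seen (ks.filter (fun k => w.contains k)) = pvCollect w seen ks := by
  intro ks
  induction ks with
  | nil => intro seen; simp
  | cons a ks ih =>
    intro seen
    by_cases hw : w.contains a = true
    · rw [List.filter_cons_of_pos hw, pvCollect, pvCollect]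
      by_cases hm : a ∉ seen
      · rw [if_pos ⟨hw, hm⟩, if_pos ⟨hw, hm⟩, ih]
      · rw [if_neg (by tauto), if_neg (by tauto), ih]
    · rw [List.filter_cons_of_neg (by simpa using hw), pvCollect]
      rw [if_neg (by tauto), ih]

lemma pv_collect_nil_eq_filter (w : PySem.Dict String Int) :
    ∀ (ks seen : List String), ks.Nodup → (∀ k ∈ ks, k ∉ seen) →
      pvCollect w seen ks = ks.filter (fun k => w.contains k) := by
  intro ks
  induction ks with
  | nil => intro seen _ _; simp [pvCollect]
  | cons a ks ih =>
    intro seen hnd hd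
    have ha : a ∉ seen := hd a (List.mem_cons_self ..)
    rw [pvCollect]
    by_cases hw : w.contains a = true
    · rw [if_pos ⟨hw, ha⟩, List.filter_cons_of_pos hw]
      congr 1
      apply ih
      · exact (List.nodup_cons.mp hnd).2
      · intro k hk
        simp only [List.mem_append, List.mem_singleton]
        rintro (hs | rfl)
        · exact hd k (List.mem_cons_of_mem _ hk) hs
        · exact (List.nodup_cons.mp hnd).1 hk
    · rw [if_neg (by tauto), List.filter_cons_of_neg (by simpa using hw)]
      exact ih seen (List.nodup_cons.mp hnd).2 (fun k hk => hd k (List.mem_cons_of_mem _ hk))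

-- A's result, characterized: the entries of pvOrdKeys, in order
def pvOrdKeys (semiTrades fullTrades withoutCurrent : List (String × Int)) : List String :=
  let w := PySem.Dict.ofList withoutCurrent
  let c1 := pvCollect w [] (PySem.Dict.ofList fullTrades).keys.reverse
  let c2 := pvCollect w c1 (PySem.Dict.ofList semiTrades).keys.reverse
  (c1 ++ c2) ++ pvCollect w (c1 ++ c2) w.keys

lemma pvA_char (semiTrades fullTrades withoutCurrent : List (String × Int)) :
    change_trades_order semiTrades fullTrades withoutCurrent
      = (pvOrdKeys semiTrades fullTrades withoutCurrent).map (pvEntry (PySem.Dict.ofList withoutCurrent)) := by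
  unfold change_trades_order pvOrdKeys
  simp only []
  set w := PySem.Dict.ofList withoutCurrent with hw
  set S := (PySem.Dict.ofList semiTrades).keys with hS
  set F := (PySem.Dict.ofList fullTrades).keys with hF
  set c1 := pvCollect w [] F.reverse with hc1
  set c2 := pvCollect w [] S.reverse with hc2
  have hndS : S.reverse.Nodup := List.nodup_reverse.mpr (PySem.Dict.nodup_keys_ofList semiTrades)
  have hndc1 : c1.Nodup := by
    have := pv_collect_nodup w F.reverse [] List.nodup_nil
    simpa [hc1] using this
  have hndo2 : (c1 ++ pvCollect w c1 S.reverse).Nodup := pv_collect_nodup w S.reverse c1 hndc1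
  rw [pv_stage1 semiTrades withoutCurrent, pv_stage1 fullTrades withoutCurrent]
  rw [show (PySem.Dict.mk (c2.map (pvEntry w))).items = c2.map (pvEntry w) from rfl]
  rw [List.foldl_map]
  have hstep2 :
      List.foldl (fun (x : PySem.Dict String Int) y => x.insert (pvEntry w y).1 (pvEntry w y).2)
        (PySem.Dict.mk (c1.map (pvEntry w))) c2
      = PySem.Dict.mk ((c1 ++ pvCollect w c1 S.reverse).map (pvEntry w)) := by
    rw [PySem.List.foldl_congr_mem c2
      (fun (x : PySem.Dict String Int) y => x.insert (pvEntry w y).1 (pvEntry w y).2)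
      (fun acc k => if w.contains k then acc.insert k (w.getD k 0) else acc)
      (PySem.Dict.mk (c1.map (pvEntry w)))
      (by
        intro acc x hx
        have hcx : w.contains x = true := pv_collect_mem w S.reverse [] x (by simpa [hc2] using hx)
        simp [pvEntry, hcx])]
    rw [pv_masterA w c2 c1 hndc1]
    have hfilt : c2 = S.reverse.filter (fun k => w.contains k) :=
      pv_collect_nil_eq_filter w S.reverse [] hndS (by simp)
    rw [hfilt, pv_collect_filter]
  rw [hstep2]
  rw [pv_masterN w w.keys (c1 ++ pvCollect w c1 S.reverse) hndo2
      (fun k hk => (PySem.Dict.contains_iff_mem_keys w k).mpr hk)]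

-- ---- B side: characterization of the rank dict ----

lemma pvRankInit_contains (n : Int) :
    ∀ (ks : List String) (r : PySem.Dict String Int) (i : Int) (k : String),
      (pvRankInit n r i ks).contains k = (decide (k ∈ ks) || r.contains k) := by
  intro ks
  induction ks with
  | nil => intro r i k; simp [pvRankInit]
  | cons a ks ih =>
    intro r i k
    rw [pvRankInit, ih]
    rw [PySem.Dict.contains_insert]
    by_cases h : k = a
    · subst h; by_cases hks : k ∈ ks <;> simp [hks]
    · have hba : (k == a) = false := beq_eq_false_iff_ne.mpr h
      by_cases hks : k ∈ ks <;> simp [hks, hba, h]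

lemma pvRankOver_contains (f : Int → Int) :
    ∀ (ks : List String) (r : PySem.Dict String Int) (i : Int) (k : String),
      (pvRankOver f r i ks).contains k = r.contains k := by
  intro ks
  induction ks with
  | nil => intro r i k; simp [pvRankOver]
  | cons a ks ih =>
    intro r i k
    rw [pvRankOver, ih]
    by_cases hca : r.contains a = true
    · rw [if_pos hca, PySem.Dict.contains_insert]
      by_cases h : k = a
      · subst h; simp [hca]
      · simp [h]
    · rw [if_neg hca]

lemma pvRankInit_get? (n : Int) :
    ∀ (ks : List String) (r : PySem.Dict String Int) (i : Int) (k : String), ks.Nodup →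
      (pvRankInit n r i ks).get? k
        = if k ∈ ks then some (2 * n + i + (ks.idxOf k : Int)) else r.get? k := by
  intro ks
  induction ks with
  | nil => intro r i k _; simp [pvRankInit]
  | cons a ks ih =>
    intro r i k hnd
    rw [pvRankInit, ih (r.insert a (2 * n + i)) (i + 1) k (List.nodup_cons.mp hnd).2]
    by_cases hk : k ∈ ks
    · have hka : k ≠ a := by
        rintro rfl; exact (List.nodup_cons.mp hnd).1 hk
      rw [if_pos hk, if_pos (List.mem_cons_of_mem _ hk)]
      have hidx : ((a :: ks).idxOf k : Int) = (ks.idxOf k : Int) + 1 := by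
        rw [List.idxOf_cons_ne _ (by simpa using fun h => hka h.symm)]
        push_cast; ring
      rw [hidx]; congr 1; ring
    · rw [if_neg hk, PySem.Dict.get?_insert]
      by_cases hka : k = a
      · subst hka
        rw [if_pos rfl, if_pos (List.mem_cons_self ..)]
        simp [List.idxOf_cons_self]
      · rw [if_neg hka, if_neg (by simp [hka, hk])]

lemma pvRankOver_get? (f : Int → Int) :
    ∀ (ks : List String) (r : PySem.Dict String Int) (i : Int) (k : String), ks.Nodup →
      (pvRankOver f r i ks).get? k
        = if k ∈ ks ∧ r.contains k = true then some (f (i + (ks.idxOf k : Int))) else r.get? k := by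
  intro ks
  induction ks with
  | nil => intro r i k _; simp [pvRankOver]
  | cons a ks ih =>
    intro r i k hnd
    have htail := (List.nodup_cons.mp hnd).2
    have hidx : k ∈ ks → ((a :: ks).idxOf k : Int) = (ks.idxOf k : Int) + 1 := by
      intro hk
      have hka : k ≠ a := by rintro rfl; exact (List.nodup_cons.mp hnd).1 hk
      rw [List.idxOf_cons_ne _ (by simpa using fun h => hka h.symm)]
      push_cast; ring
    by_cases hca : r.contains a = true
    · rw [pvRankOver, if_pos hca, ih (r.insert a (f i)) (i + 1) k htail]
      by_cases hk : k ∈ ks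
      · have hka : k ≠ a := by rintro rfl; exact (List.nodup_cons.mp hnd).1 hk
        have hcic : (r.insert a (f i)).contains k = r.contains k := by
          rw [PySem.Dict.contains_insert]
          simp [beq_eq_false_iff_ne.mpr hka]
        rw [hcic]
        by_cases hcr : r.contains k = true
        · rw [if_pos ⟨hk, hcr⟩, if_pos ⟨List.mem_cons_of_mem _ hk, hcr⟩, hidx hk]
          congr 1; ring
        · rw [if_neg (by tauto), if_neg (by tauto), PySem.Dict.get?_insert, if_neg hka]
      · have hcond1 : ¬ (k ∈ ks ∧ (r.insert a (f i)).contains k = true) := by tauto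
        rw [if_neg hcond1, PySem.Dict.get?_insert]
        by_cases hka : k = a
        · subst hka
          rw [if_pos rfl, if_pos ⟨List.mem_cons_self .., hca⟩]
          simp [List.idxOf_cons_self]
        · rw [if_neg hka, if_neg (by simp [hka, hk])]
    · rw [pvRankOver, if_neg hca, ih r (i + 1) k htail]
      by_cases hk : k ∈ ks
      · by_cases hcr : r.contains k = true
        · rw [if_pos ⟨hk, hcr⟩, if_pos ⟨List.mem_cons_of_mem _ hk, hcr⟩, hidx hk]
          congr 1; ring
        · rw [if_neg (by tauto), if_neg (by tauto)]
      · have hR : ¬ (k ∈ a :: ks ∧ r.contains k = true) := by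
          rintro ⟨hm, hc⟩
          rcases List.mem_cons.mp hm with rfl | hm
          · exact hca hc
          · exact hk hm
        rw [if_neg (by tauto), if_neg hR]

-- the closed-form priority of a key of withoutCurrent
def pvRk (n : Int) (F S W : List String) (k : String) : Int :=
  if k ∈ F then n - 1 - (F.idxOf k : Int)
  else if k ∈ S then 2 * n - 1 - (S.idxOf k : Int)
  else 2 * n + (W.idxOf k : Int)

lemma pvRank_getD (n : Int) (F S W : List String)
    (hF : F.Nodup) (hS : S.Nodup) (hW : W.Nodup) (k : String) (hk : k ∈ W) :
    (pvRankOver (fun i => n - 1 - i)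
      (pvRankOver (fun i => 2 * n - 1 - i)
        (pvRankInit n PySem.Dict.empty 0 W) 0 S)
      0 F).getD k 0 = pvRk n F S W k := by
  have hc0 : (pvRankInit n PySem.Dict.empty 0 W).contains k = true := by
    rw [pvRankInit_contains]; simp [hk]
  have hc1 : (pvRankOver (fun i => 2 * n - 1 - i) (pvRankInit n PySem.Dict.empty 0 W) 0 S).contains k = true := by
    rw [pvRankOver_contains]; exact hc0
  rw [PySem.Dict.getD_eq_get?_getD, pvRankOver_get? _ F _ _ _ hF]
  unfold pvRk
  by_cases hkF : k ∈ F
  · rw [if_pos ⟨hkF, hc1⟩, if_pos hkF]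
    simp
  · rw [if_neg (by tauto), if_neg hkF, pvRankOver_get? _ S _ _ _ hS]
    by_cases hkS : k ∈ S
    · rw [if_pos ⟨hkS, hc0⟩, if_pos hkS]
      simp
    · rw [if_neg (by tauto), if_neg hkS, pvRankInit_get? _ W _ _ _ hW, if_pos hk]
      simp

lemma pvIdx_pairwise (l : List String) (h : l.Nodup) :
    l.Pairwise (fun a b => l.idxOf a < l.idxOf b) := by
  rw [List.pairwise_iff_getElem]
  intro i j hi hj hij
  rw [List.Nodup.idxOf_getElem h i hi, List.Nodup.idxOf_getElem h j hj]
  exact hij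

lemma pvIdx_lt_length (l : List String) (a : String) (h : a ∈ l) : l.idxOf a < l.length :=
  List.idxOf_lt_length_of_mem h

-- ===== VERDICT (by name: the statement is the Claim_ definition above) =====
theorem change_trades_order_spec : Claim_equal_change_trades_order := by
  unfold Claim_equal_change_trades_order
  intro semiTrades fullTrades withoutCurrent _
  unfold Spec_change_trades_order
  rw [pvA_char]
  unfold change_trades_order_alt
  simp only []
  set w := PySem.Dict.ofList withoutCurrent with hw
  set S := (PySem.Dict.ofList semiTrades).keys with hS
  set F := (PySem.Dict.ofList fullTrades).keys with hF
  set W := w.keys with hWdef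
  have hndF : F.Nodup := PySem.Dict.nodup_keys_ofList fullTrades
  have hndS : S.Nodup := PySem.Dict.nodup_keys_ofList semiTrades
  have hndW : W.Nodup := PySem.Dict.nodup_keys_ofList withoutCurrent
  set n : Int := ((max (max (PySem.Dict.ofList semiTrades).size (PySem.Dict.ofList fullTrades).size) w.size : Nat) : Int) + 1 with hn
  -- sizes vs key-list lengths
  have hsizeS : S.length = (PySem.Dict.ofList semiTrades).size := by
    rw [hS]; simp [PySem.Dict.keys, PySem.Dict.size]
  have hsizeF : F.length = (PySem.Dict.ofList fullTrades).size := by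
    rw [hF]; simp [PySem.Dict.keys, PySem.Dict.size]
  have hsizeW : W.length = w.size := by
    rw [hWdef]; simp [PySem.Dict.keys, PySem.Dict.size]
  have hnS : (S.length : Int) ≤ n - 1 := by
    rw [hn, hsizeS]; push_cast; omega
  have hnF : (F.length : Int) ≤ n - 1 := by
    rw [hn, hsizeF]; push_cast; omega
  have hn1 : (1 : Int) ≤ n := by rw [hn]; have := Int.natCast_nonneg (max (max (PySem.Dict.ofList semiTrades).size (PySem.Dict.ofList fullTrades).size) w.size); omega
  set c1 := pvCollect w [] F.reverse with hc1
  set c2 := pvCollect w c1 S.reverse with hc2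
  set c3 := pvCollect w (c1 ++ c2) W with hc3
  have hOrd : pvOrdKeys semiTrades fullTrades withoutCurrent = (c1 ++ c2) ++ c3 := rfl
  rw [hOrd]
  set ord := (c1 ++ c2) ++ c3 with hord
  -- membership facts
  have hndc1 : c1.Nodup := by
    have := pv_collect_nodup w F.reverse [] List.nodup_nil
    simpa [hc1] using this
  have hnd12 : (c1 ++ c2).Nodup := pv_collect_nodup w S.reverse c1 hndc1
  have hndord : ord.Nodup := pv_collect_nodup w W (c1 ++ c2) hnd12
  have hmemc1 : ∀ k, k ∈ c1 → k ∈ F ∧ w.contains k = true := by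
    intro k hk
    exact ⟨List.mem_reverse.mp ((pv_collect_sublist w F.reverse []).mem hk),
      pv_collect_mem w F.reverse [] k hk⟩
  have hmemc2 : ∀ k, k ∈ c2 → (k ∈ S ∧ k ∉ F) ∧ w.contains k = true := by
    intro k hk
    have hwc : w.contains k = true := pv_collect_mem w S.reverse c1 k hk
    have hkS : k ∈ S := List.mem_reverse.mp ((pv_collect_sublist w S.reverse c1).mem hk)
    have hknc1 : k ∉ c1 := pv_collect_not_seen w S.reverse c1 k hk
    refine ⟨⟨hkS, fun hkF => ?_⟩, hwc⟩
    rcases pv_collect_complete w F.reverse [] k (List.mem_reverse.mpr hkF) hwc with h | h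
    · simp at h
    · exact hknc1 h
  have hmemc3 : ∀ k, k ∈ c3 → (k ∈ W ∧ k ∉ F ∧ k ∉ S) := by
    intro k hk
    have hwc : w.contains k = true := pv_collect_mem w W (c1 ++ c2) k hk
    have hkW : k ∈ W := (pv_collect_sublist w W (c1 ++ c2)).mem hk
    have hkn12 : k ∉ c1 ++ c2 := pv_collect_not_seen w W (c1 ++ c2) k hk
    refine ⟨hkW, fun hkF => ?_, fun hkS => ?_⟩
    · rcases pv_collect_complete w F.reverse [] k (List.mem_reverse.mpr hkF) hwc with h | h
      · simp at h
      · exact hkn12 (List.mem_append.mpr (Or.inl h))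
    · rcases pv_collect_complete w S.reverse c1 k (List.mem_reverse.mpr hkS) hwc with h | h
      · exact hkn12 (List.mem_append.mpr (Or.inl h))
      · exact hkn12 (List.mem_append.mpr (Or.inr h))
  have hmemW : ∀ k, k ∈ ord → k ∈ W := by
    intro k hk
    rcases List.mem_append.mp hk with hk | hk
    · rcases List.mem_append.mp hk with hk | hk
      · exact (PySem.Dict.contains_iff_mem_keys w k).mp (hmemc1 k hk).2
      · exact (PySem.Dict.contains_iff_mem_keys w k).mp (hmemc2 k hk).2
    · exact (hmemc3 k hk).1
  -- ord is a permutation of W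
  have hperm : ord.Perm W := by
    rw [List.perm_ext_iff_of_nodup hndord hndW]
    intro k
    constructor
    · exact hmemW k
    · intro hkW
      have hwc : w.contains k = true := (PySem.Dict.contains_iff_mem_keys w k).mpr hkW
      rcases pv_collect_complete w W (c1 ++ c2) k hkW hwc with h | h
      · exact List.mem_append.mpr (Or.inl h)
      · exact List.mem_append.mpr (Or.inr h)
  -- ord is strictly increasing under pvRk
  have hrkc1 : ∀ k, k ∈ c1 → pvRk n F S W k = n - 1 - (F.idxOf k : Int) := by
    intro k hk; unfold pvRk; rw [if_pos (hmemc1 k hk).1]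
  have hrkc2 : ∀ k, k ∈ c2 → pvRk n F S W k = 2 * n - 1 - (S.idxOf k : Int) := by
    intro k hk; unfold pvRk
    rw [if_neg (hmemc2 k hk).1.2, if_pos (hmemc2 k hk).1.1]
  have hrkc3 : ∀ k, k ∈ c3 → pvRk n F S W k = 2 * n + (W.idxOf k : Int) := by
    intro k hk; unfold pvRk
    rw [if_neg (hmemc3 k hk).2.1, if_neg (hmemc3 k hk).2.2]
  have hpw1 : c1.Pairwise (fun a b => pvRk n F S W a < pvRk n F S W b) := by
    have hrev : F.reverse.Pairwise (fun a b => F.idxOf b < F.idxOf a) :=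
      List.pairwise_reverse.mpr (pvIdx_pairwise F hndF)
    have := List.Pairwise.sublist (pv_collect_sublist w F.reverse []) hrev
    refine List.Pairwise.imp_of_mem ?_ this
    intro a b ha hb hab
    rw [hrkc1 a ha, hrkc1 b hb]; omega
  have hpw2 : c2.Pairwise (fun a b => pvRk n F S W a < pvRk n F S W b) := by
    have hrev : S.reverse.Pairwise (fun a b => S.idxOf b < S.idxOf a) :=
      List.pairwise_reverse.mpr (pvIdx_pairwise S hndS)
    have := List.Pairwise.sublist (pv_collect_sublist w S.reverse c1) hrev
    refine List.Pairwise.imp_of_mem ?_ this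
    intro a b ha hb hab
    rw [hrkc2 a ha, hrkc2 b hb]; omega
  have hpw3 : c3.Pairwise (fun a b => pvRk n F S W a < pvRk n F S W b) := by
    have := List.Pairwise.sublist (pv_collect_sublist w W (c1 ++ c2)) (pvIdx_pairwise W hndW)
    refine List.Pairwise.imp_of_mem ?_ this
    intro a b ha hb hab
    rw [hrkc3 a ha, hrkc3 b hb]; omega
  have hb1 : ∀ k, k ∈ c1 → pvRk n F S W k ≤ n - 1 := by
    intro k hk
    have := pvIdx_lt_length F k (hmemc1 k hk).1
    rw [hrkc1 k hk]; omega
  have hb2lo : ∀ k, k ∈ c2 → n ≤ pvRk n F S W k := by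
    intro k hk
    have h := pvIdx_lt_length S k (hmemc2 k hk).1.1
    rw [hrkc2 k hk]
    have : (S.idxOf k : Int) < (S.length : Int) := by exact_mod_cast h
    omega
  have hb2hi : ∀ k, k ∈ c2 → pvRk n F S W k ≤ 2 * n - 1 := by
    intro k hk; rw [hrkc2 k hk]
    have : (0 : Int) ≤ (S.idxOf k : Int) := Int.natCast_nonneg _
    omega
  have hb3 : ∀ k, k ∈ c3 → 2 * n ≤ pvRk n F S W k := by
    intro k hk; rw [hrkc3 k hk]
    have : (0 : Int) ≤ (W.idxOf k : Int) := Int.natCast_nonneg _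
    omega
  have hpw : ord.Pairwise (fun a b => pvRk n F S W a < pvRk n F S W b) := by
    rw [hord, List.pairwise_append]
    refine ⟨?_, hpw3, ?_⟩
    · rw [List.pairwise_append]
      refine ⟨hpw1, hpw2, ?_⟩
      intro a ha b hb
      have := hb1 a ha; have := hb2lo b hb; omega
    · intro a ha b hb
      have hb3' := hb3 b hb
      rcases List.mem_append.mp ha with ha | ha
      · have := hb1 a ha; omega
      · have := hb2hi a ha; omega
  -- rank.getD agrees with pvRk on members of ord
  have hrank : ∀ k, k ∈ ord →
      (pvRankOver (fun i => n - 1 - i)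
        (pvRankOver (fun i => 2 * n - 1 - i)
          (pvRankInit n PySem.Dict.empty 0 W) 0 S)
        0 F).getD k 0 = pvRk n F S W k := by
    intro k hk
    exact pvRank_getD n F S W hndF hndS hndW k (hmemW k hk)
  -- the sorted items are exactly ord's entries
  have hitems : w.items = W.map (pvEntry w) := by
    rw [hWdef]
    exact PySem.Dict.items_eq_map_keys w hndW 0
  have hsorted :
      PySem.List.sorted w.items
        (fun kv => (pvRankOver (fun i => n - 1 - i)
          (pvRankOver (fun i => 2 * n - 1 - i)
            (pvRankInit n PySem.Dict.empty 0 W) 0 S)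
          0 F).getD kv.1 0)
      = ord.map (pvEntry w) := by
    apply PySem.List.sorted_eq_of_perm_of_pairwise_lt
    · rw [hitems]
      exact hperm.map (pvEntry w)
    · rw [List.pairwise_map]
      refine List.Pairwise.imp_of_mem ?_ hpw
      intro a b ha hb hab
      simp only [pvEntry]
      rw [hrank a ha, hrank b hb]
      exact hab
    -- keys of the sorted entries are nodup, so dict() keeps the list unchanged
  rw [hsorted]
  have hfresh : ∀ p ∈ ord.map (pvEntry w), (PySem.Dict.empty : PySem.Dict String Int).contains p.1 = false := by
    intro p _; simp [PySem.Dict.contains_empty]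
  have hkeysnd : ((ord.map (pvEntry w)).map Prod.fst).Nodup := by
    rw [List.map_map]
    have : (Prod.fst ∘ pvEntry w) = id := by
      funext k; rfl
    rw [this, List.map_id]
    exact hndord
  have hofl : (PySem.Dict.ofList (ord.map (pvEntry w))).items = ord.map (pvEntry w) := by
    show ((ord.map (pvEntry w)).foldl (fun d p => d.insert p.1 p.2) PySem.Dict.empty).items = _
    rw [PySem.Dict.items_foldl_insert_fresh (ord.map (pvEntry w)) Prod.fst Prod.snd PySem.Dict.empty hfresh hkeysnd]
    simp
    rfl
  rw [hofl]
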